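-- pv_equiv track=rewrite | github.com/pratheekdhananjaya/CS580_Project | Q4.py | solve
-- ===== SOURCE A (Python) =====
-- import collections
--
-- def solve(relations):
--     currentResult = relations[0]
--
--     for i in range(1, len(relations)):
--         nextRelation = relations[i]
--
--         idx = collections.defaultdict(list)
--         for r in nextRelation:
--             idx[r[0]].append(r)
--
--         newResult = []
--         for tup in currentResult:
--             key = tup[-1]
--             if key in idx:
--                 for match in idx[key]:
--                     newResult.append(tup + (match[1],))
--         currentResult = newResult
--
--     return currentResult
-- ===== SOURCE B (Python) =====
-- def solve(relations):
--     # Depth-first backtracking: extend each starting pair through the whole chain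
--     # at once (recursion over the remaining relations), instead of A's staged
--     # breadth passes that materialise every intermediate join result.
--     out = []
--
--     def extend(tup, rest):
--         if not rest:
--             out.append(tup)
--             return
--         nxt = rest[0]
--         for a, b in nxt:
--             if a == tup[-1]:
--                 extend(tup + (b,), rest[1:])
--
--     for pair in relations[0]:
--         extend(pair, relations[1:])
--     return out
-- ===== Notes on version B (the rewrite author's own statement) =====
-- stated objective: alternative
-- what changed: A runs staged hash-join passes (building a defaultdict index per relation and materialising every intermediate result); B does recursive depth-first backtracking that extends each starting pair through all remaining relations at once, emitting finished tuples in the same order.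
import Mathlib
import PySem

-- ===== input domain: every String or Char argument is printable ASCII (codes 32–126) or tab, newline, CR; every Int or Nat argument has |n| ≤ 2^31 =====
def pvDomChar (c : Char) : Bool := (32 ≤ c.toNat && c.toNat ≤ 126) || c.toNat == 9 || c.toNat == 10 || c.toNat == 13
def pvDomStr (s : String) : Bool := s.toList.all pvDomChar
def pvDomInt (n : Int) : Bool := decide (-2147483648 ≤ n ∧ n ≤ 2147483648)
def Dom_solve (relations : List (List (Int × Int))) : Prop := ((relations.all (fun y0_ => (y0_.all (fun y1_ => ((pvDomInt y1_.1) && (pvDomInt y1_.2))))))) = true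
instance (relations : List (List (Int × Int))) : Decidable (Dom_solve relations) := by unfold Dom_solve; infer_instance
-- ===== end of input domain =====

-- B replaces A's staged hash-join passes (which materialise every intermediate
-- result) by depth-first backtracking that extends each starting pair through
-- the whole chain at once; same output order, no speed claim.

-- ===== PORT A =====
-- tup[-1]: every tuple in currentResult has length ≥ 2, so getLastD 0 is exact.
def solve (relations : List (List (Int × Int))) : List (List Int) :=
  let currentResult := (PySem.List.pyGetD relations 0 []).map (fun r => [r.1, r.2])
  (PySem.List.pyRange 1 (PySem.List.len relations) 1).foldl (fun cur i =>
    let nextRelation := PySem.List.pyGetD relations i []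
    let idx := nextRelation.foldl
      (fun d r => d.modify r.1 [] (fun l => l ++ [r])) PySem.Dict.empty
    cur.foldl (fun newResult tup =>
      let key := tup.getLastD 0
      if idx.contains key then
        (idx.getD key []).foldl (fun a m => a ++ [tup ++ [m.2]]) newResult
      else newResult) []) currentResult

-- ===== PORT B =====
-- B's recursive extend: emission into the accumulator `out` in DFS order is the
-- concatenation of the recursive results, in the same order.
def solveExtend (tup : List Int) (rest : List (List (Int × Int))) : List (List Int) :=
  match rest with
  | [] => [tup]
  | nxt :: rs =>
      nxt.flatMap (fun r =>
        if r.1 == tup.getLastD 0 then solveExtend (tup ++ [r.2]) rs else [])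

def solve_alt (relations : List (List (Int × Int))) : List (List Int) :=
  (PySem.List.pyGetD relations 0 []).flatMap
    (fun p => solveExtend [p.1, p.2] (PySem.List.slice relations (some 1) none))

-- ===== PRECONDITION & SPEC =====
-- Pre_ excludes only the empty list, on which A raises IndexError (relations[0]).
def Pre_solve (relations : List (List (Int × Int))) : Prop := relations ≠ []
instance (relations : List (List (Int × Int))) : Decidable (Pre_solve relations) := by unfold Pre_solve; infer_instance
def pvWitness_solve : (List (List (Int × Int))) := [[(1, 2), (3, 4)], [(2, 5), (2, 6)]]

def Spec_solve (relations : List (List (Int × Int))) (out : List (List Int)) : Prop := out = solve_alt relations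
instance (relations : List (List (Int × Int))) (out : List (List Int)) : Decidable (Spec_solve relations out) := by unfold Spec_solve; infer_instance

-- ===== CLAIM (what is proved, stated in full; the proofs are below) =====
def Claim_equal_solve : Prop := ∀ (relations : List (List (Int × Int))), Dom_solve relations → Pre_solve relations → Spec_solve relations (solve relations)

-- ===== LEMMAS AND PROOFS =====

-- lookup in A's per-step index: the values stored under k are exactly the pairs of the
-- processed list whose first component is k, in order
lemma idx_getD (l : List (Int × Int)) (d : PySem.Dict Int (List (Int × Int))) (k : Int) :
    (l.foldl (fun d r => d.modify r.1 [] (fun l => l ++ [r])) d).getD k []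
      = d.getD k [] ++ l.filter (fun r => r.1 == k) := by
  induction l generalizing d with
  | nil => simp
  | cons r t ih =>
      simp only [List.foldl_cons, List.filter_cons, ih, PySem.Dict.getD_modify]
      by_cases h : k = r.1
      · simp [h]
      · simp [h, Ne.symm h]

-- membership in A's per-step index
lemma idx_contains (l : List (Int × Int)) (d : PySem.Dict Int (List (Int × Int))) (k : Int) :
    (l.foldl (fun d r => d.modify r.1 [] (fun l => l ++ [r])) d).contains k
      = (d.contains k || l.any (fun r => r.1 == k)) := by
  induction l generalizing d with
  | nil => simp
  | cons r t ih =>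
      simp only [List.foldl_cons, List.any_cons, ih, PySem.Dict.contains_modify]
      by_cases h : k = r.1
      · simp [h]
      · have h2 : (k == r.1) = false := by simpa using h
        have h3 : (r.1 == k) = false := by simpa using Ne.symm h
        simp [h2, h3]

-- one chain step of A (indexed hash join) equals a nested-loop join step
lemma step_eq (cur : List (List Int)) (next : List (Int × Int)) :
    (cur.foldl (fun newResult tup =>
        let key := tup.getLastD 0
        if (next.foldl (fun d r => d.modify r.1 [] (fun l => l ++ [r]))
              PySem.Dict.empty).contains key then
          ((next.foldl (fun d r => d.modify r.1 [] (fun l => l ++ [r]))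
              PySem.Dict.empty).getD key []).foldl (fun a m => a ++ [tup ++ [m.2]]) newResult
        else newResult) [])
      = cur.flatMap (fun tup =>
          (next.filter (fun m => m.1 == tup.getLastD 0)).map (fun m => tup ++ [m.2])) := by
  have hf : (fun (newResult : List (List Int)) (tup : List Int) =>
        let key := tup.getLastD 0
        if (next.foldl (fun d r => d.modify r.1 [] (fun l => l ++ [r]))
              PySem.Dict.empty).contains key then
          ((next.foldl (fun d r => d.modify r.1 [] (fun l => l ++ [r]))
              PySem.Dict.empty).getD key []).foldl (fun a m => a ++ [tup ++ [m.2]]) newResult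
        else newResult)
      = fun acc tup =>
          acc ++ (next.filter (fun m => m.1 == tup.getLastD 0)).map (fun m => tup ++ [m.2]) := by
    funext acc tup
    by_cases h : (next.foldl (fun d r => d.modify r.1 [] (fun l => l ++ [r]))
        PySem.Dict.empty).contains (tup.getLastD 0) = true
    · simp only [h, if_true]
      rw [PySem.List.foldl_append_singleton_eq_map, idx_getD]
      simp
    · simp only [h]
      rw [idx_contains] at h
      simp only [PySem.Dict.contains_empty, Bool.false_or, List.any_eq_true,
        not_exists, not_and] at h
      have hnil : next.filter (fun m => m.1 == tup.getLastD 0) = [] := by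
        rw [List.filter_eq_nil_iff]
        intro m hm
        simpa using h m hm
      rw [hnil]
      simp
  rw [hf, PySem.List.foldl_append_eq_flatMap]
  simp

-- folding the nested-loop join steps over the remaining relations = DFS extension
lemma filter_flatMap_extend (nxt : List (Int × Int)) (rs : List (List (Int × Int))) (tup : List Int) :
    (nxt.filter (fun m => m.1 == tup.getLastD 0)).flatMap (fun m => solveExtend (tup ++ [m.2]) rs)
      = nxt.flatMap (fun r => if r.1 == tup.getLastD 0 then solveExtend (tup ++ [r.2]) rs else []) := by
  induction nxt with
  | nil => rfl
  | cons r t ih =>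
      simp only [List.filter_cons, List.flatMap_cons]
      by_cases h : (r.1 == tup.getLastD 0) = true
      · simp only [h, if_true, List.flatMap_cons, ih]
      · simp only [h, Bool.false_eq_true, if_false, ih]
        simp

lemma foldl_join_eq_extend (rels : List (List (Int × Int))) (cur : List (List Int)) :
    rels.foldl (fun cur next => cur.flatMap (fun tup =>
        (next.filter (fun m => m.1 == tup.getLastD 0)).map (fun m => tup ++ [m.2]))) cur
      = cur.flatMap (fun tup => solveExtend tup rels) := by
  induction rels generalizing cur with
  | nil => simp [solveExtend]
  | cons nxt rs ih =>
      rw [List.foldl_cons, ih, List.flatMap_assoc]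
      congr 1
      funext tup
      rw [List.flatMap_map]
      rw [show solveExtend tup (nxt :: rs)
            = nxt.flatMap (fun r => if r.1 == tup.getLastD 0 then solveExtend (tup ++ [r.2]) rs else [])
          from rfl]
      exact filter_flatMap_extend nxt rs tup

-- ===== VERDICT (by name: the statement is the Claim_ definition above) =====
theorem solve_spec : Claim_equal_solve := by
  intro relations _ _
  unfold Spec_solve solve solve_alt
  rw [PySem.List.slice_from_one, PySem.List.len_eq]
  have h1 := PySem.List.foldl_pyRange_pyGetD' relations ([] : List (Int × Int))
      (fun cur next => cur.flatMap (fun tup =>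
        (next.filter (fun m => m.1 == tup.getLastD 0)).map (fun m => tup ++ [m.2])))
      ((PySem.List.pyGetD relations 0 []).map (fun r => [r.1, r.2])) (a := 1) (by omega)
  rw [show ((1 : Int).toNat) = 1 from rfl, List.drop_one] at h1
  have hfun : (fun (cur : List (List Int)) (i : Int) =>
      let nextRelation := PySem.List.pyGetD relations i []
      let idx := List.foldl (fun d r => d.modify r.1 [] fun l => l ++ [r])
        PySem.Dict.empty nextRelation
      List.foldl (fun newResult tup =>
        let key := tup.getLastD 0
        if idx.contains key then
          List.foldl (fun a m => a ++ [tup ++ [m.2]]) newResult (idx.getD key [])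
        else newResult) [] cur)
      = (fun (acc : List (List Int)) (j : Int) =>
          (fun cur next => List.flatMap (fun tup =>
              List.map (fun m => tup ++ [m.2])
                (List.filter (fun m => m.1 == tup.getLastD 0) next)) cur)
            acc (PySem.List.pyGetD relations j [])) := by
    funext cur i
    exact step_eq cur (PySem.List.pyGetD relations i [])
  rw [hfun, h1, foldl_join_eq_extend, List.flatMap_map]
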